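-- pv_equiv track=rewrite | github.com/gladiatorr22/Python-programming | kkk.py | solution
-- ===== SOURCE A (Python) =====
-- def solution(Arr, n):
--     max_min_score = 0
--
--     for i in range(1, n - 1):       # Split A and B
--         for j in range(i + 1, n):   # Split B and C
--             A = Arr[:i]
--             B = Arr[i:j]
--             C = Arr[j:]
--
--             min_score = float('inf')
--             for w1 in A:
--                 for w2 in B:
--                     for w3 in C:
--                         score = abs(w1 - w2) + abs(w2 - w3)
--                         min_score = min(min_score, score)
--
--             max_min_score = max(max_min_score, min_score)
--
--     return max_min_score
-- ===== SOURCE B (Python) =====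
-- def _nearest(w, xs):
--     # minimal |w - x| over xs; None if xs is empty
--     best = None
--     for x in xs:
--         d = abs(w - x)
--         if best is None or d < best:
--             best = d
--     return best
--
--
-- def solution(Arr, n):
--     # Separate the min: min over (w1,w2,w3) of |w1-w2|+|w2-w3|
--     # equals min over w2 of (nearest(w2,left) + nearest(w2,right)).
--     best = 0
--     for i in range(1, n - 1):
--         left = Arr[:i]
--         for j in range(i + 1, n):
--             mid = Arr[i:j]
--             right = Arr[j:]
--             m = None
--             for w2 in mid:
--                 s = _nearest(w2, left) + _nearest(w2, right)
--                 if m is None or s < m: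
--                     m = s
--             if m is not None and m > best:
--                 best = m
--     return best
-- ===== Notes on version B (the rewrite author's own statement) =====
-- stated objective: alternative
-- what changed: B replaces A's triple nested minimum loop over A x B x C (per split) by a single pass over the middle block, using that |w1-w2|+|w2-w3| separates into nearest-distance(w2,left) + nearest-distance(w2,right), so one nested loop disappears (O(n^4) vs A's O(n^5) arithmetic steps; any speed label is left to a timing run's measurement).
-- outside the precondition, e.g. on solution([1, 2, 3], 5): A returns inf, B raises TypeError
import Mathlib
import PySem

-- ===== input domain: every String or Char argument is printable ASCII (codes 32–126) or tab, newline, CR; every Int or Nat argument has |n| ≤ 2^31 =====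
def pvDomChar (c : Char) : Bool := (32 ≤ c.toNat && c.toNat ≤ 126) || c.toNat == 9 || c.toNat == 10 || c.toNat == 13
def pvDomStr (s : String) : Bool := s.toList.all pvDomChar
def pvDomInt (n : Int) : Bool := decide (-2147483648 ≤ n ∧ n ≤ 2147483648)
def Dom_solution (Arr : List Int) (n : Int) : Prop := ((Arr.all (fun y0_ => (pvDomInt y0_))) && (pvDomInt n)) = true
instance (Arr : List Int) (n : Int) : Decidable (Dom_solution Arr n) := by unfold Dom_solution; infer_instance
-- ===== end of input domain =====

-- B separates the per-split triple minimum into nearest-distance sums over the middle block (one nested loop fewer); no argument mutation in either version.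


-- ===== PORT A =====
-- min_score starts at float('inf'); ported as Option Int with none = inf.
-- pyOMin is Python's min(min_score, score) on that representation.
def pyOMin (o : Option Int) (x : Int) : Option Int :=
  some (match o with | none => x | some m => min m x)

def solution (Arr : List Int) (n : Int) : Int :=
  (PySem.List.pyRange 1 (n - 1) 1).foldl (fun maxMinScore i =>
    (PySem.List.pyRange (i + 1) n 1).foldl (fun maxMinScore j =>
      let A := PySem.List.slice Arr none (some i)
      let B := PySem.List.slice Arr (some i) (some j)
      let C := PySem.List.slice Arr (some j) none
      let minScore : Option Int :=
        A.foldl (fun o1 w1 =>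
          B.foldl (fun o2 w2 =>
            C.foldl (fun o3 w3 => pyOMin o3 (|w1 - w2| + |w2 - w3|)) o2) o1) none
      -- max(max_min_score, min_score): under Pre_ minScore is always some
      match minScore with
      | some v => max maxMinScore v
      | none => maxMinScore) maxMinScore) 0

-- ===== PORT B =====
def nearestDist (w : Int) (xs : List Int) : Option Int :=
  xs.foldl (fun best x =>
    let d := |w - x|
    match best with
    | none => some d
    | some b => if d < b then some d else some b) none

-- _nearest(..) + _nearest(..): Python raises TypeError on None; under Pre_ both
-- are always some, so .getD 0 is exact there.
def solution_alt (Arr : List Int) (n : Int) : Int :=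
  (PySem.List.pyRange 1 (n - 1) 1).foldl (fun best i =>
    let left := PySem.List.slice Arr none (some i)
    (PySem.List.pyRange (i + 1) n 1).foldl (fun best j =>
      let mid := PySem.List.slice Arr (some i) (some j)
      let right := PySem.List.slice Arr (some j) none
      let m : Option Int := mid.foldl (fun m w2 =>
        let s := (nearestDist w2 left).getD 0 + (nearestDist w2 right).getD 0
        match m with
        | none => some s
        | some mv => if s < mv then some s else some mv) none
      match m with
      | some mv => if mv > best then mv else best
      | none => best) best) 0

-- ===== PRECONDITION & SPEC =====
-- Pre_ excludes n ≥ 3 with n > len(Arr): there some split has an empty part, A's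
-- min stays float('inf') and A returns the float inf (not an int); B raises there.
def Pre_solution (Arr : List Int) (n : Int) : Prop := n ≤ 2 ∨ n ≤ (Arr.length : Int)
instance (Arr : List Int) (n : Int) : Decidable (Pre_solution Arr n) := by unfold Pre_solution; infer_instance
def pvWitness_solution : List Int × Int := ([3, 1, 7, 2, 9], 5)

def Spec_solution (Arr : List Int) (n : Int) (out : Int) : Prop := out = solution_alt Arr n
instance (Arr : List Int) (n : Int) (out : Int) : Decidable (Spec_solution Arr n out) := by unfold Spec_solution; infer_instance

-- ===== CLAIM (what is proved, stated in full; the proofs are below) =====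
def Claim_equal_solution : Prop := ∀ (Arr : List Int) (n : Int), Dom_solution Arr n → Pre_solution Arr n → Spec_solution Arr n (solution Arr n)

-- ===== LEMMAS AND PROOFS =====

-- min-fold with none = +inf, as both ports' inner loops use
def ominFold (xs : List Int) : Option Int := xs.foldl pyOMin none

lemma foldl_pyOMin_some (l : List Int) (m : Int) :
    l.foldl pyOMin (some m) = some (l.foldl min m) := by
  induction l generalizing m with
  | nil => rfl
  | cons x t ih => simp [pyOMin, ih]

lemma ominFold_cons (x : Int) (t : List Int) :
    ominFold (x :: t) = some (t.foldl min x) := by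
  simp [ominFold, pyOMin, foldl_pyOMin_some]

lemma ominFold_eq_none_iff (xs : List Int) : ominFold xs = none ↔ xs = [] := by
  cases xs with
  | nil => simp [ominFold]
  | cons x t => simp [ominFold_cons]

lemma ominFold_mem {xs : List Int} {m : Int} (h : ominFold xs = some m) : m ∈ xs := by
  cases xs with
  | nil => simp [ominFold] at h
  | cons x t =>
    rw [ominFold_cons] at h
    injection h with h
    rcases PySem.List.foldl_min_mem t x with h' | h'
    · simp [← h, h']
    · simp [← h, h']

lemma ominFold_isMin {xs : List Int} {m : Int} (h : ominFold xs = some m) :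
    ∀ y ∈ xs, m ≤ y := by
  cases xs with
  | nil => simp [ominFold] at h
  | cons x t =>
    rw [ominFold_cons] at h
    injection h with h
    intro y hy
    rcases List.mem_cons.mp hy with rfl | hy
    · exact h ▸ (PySem.List.foldl_min_le t y).1
    · exact h ▸ (PySem.List.foldl_min_le t x).2 y hy

-- A's triple nested loop is the min-fold of the flattened list of scores
lemma double_flatten (B C : List Int) (g2 : Int → Int → Int) (o : Option Int) :
    B.foldl (fun o2 w2 => C.foldl (fun o3 w3 => pyOMin o3 (g2 w2 w3)) o2) o
    = (B.flatMap fun w2 => C.map fun w3 => g2 w2 w3).foldl pyOMin o := by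
  induction B generalizing o with
  | nil => rfl
  | cons b B ih =>
    simp only [List.flatMap_cons, List.foldl_append, List.foldl_cons, ih, List.foldl_map]

lemma triple_flatten (A B C : List Int) (g : Int → Int → Int → Int) (o : Option Int) :
    A.foldl (fun o1 w1 =>
      B.foldl (fun o2 w2 =>
        C.foldl (fun o3 w3 => pyOMin o3 (g w1 w2 w3)) o2) o1) o
    = (A.flatMap fun w1 => B.flatMap fun w2 => C.map fun w3 => g w1 w2 w3).foldl pyOMin o := by
  rw [List.foldl_flatMap]
  apply PySem.List.foldl_congr_mem
  intro o1 w1 _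
  rw [double_flatten]

-- B's helper is the min-fold of the distances
lemma nearestDist_eq (w : Int) (xs : List Int) :
    nearestDist w xs = ominFold (xs.map fun x => |w - x|) := by
  unfold nearestDist ominFold
  rw [List.foldl_map]
  apply PySem.List.foldl_congr_mem
  intro best x _
  cases best with
  | none => rfl
  | some b =>
    simp only [pyOMin]
    split_ifs with h <;> simp <;> omega

-- B's middle-block loop is the min-fold of the per-w2 sums
lemma midFold_eq (B : List Int) (s : Int → Int) (o : Option Int) :
    B.foldl (fun m w2 =>
      match m with
      | none => some (s w2)
      | some mv => if s w2 < mv then some (s w2) else some mv) o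
    = (B.map s).foldl pyOMin o := by
  rw [List.foldl_map]
  apply PySem.List.foldl_congr_mem
  intro m w2 _
  cases m with
  | none => rfl
  | some mv =>
    simp only [pyOMin]
    split_ifs with h <;> simp <;> omega

lemma nearest_le {xs : List Int} {x : Int} (w : Int) (hx : x ∈ xs) :
    (nearestDist w xs).getD 0 ≤ |w - x| := by
  have hne : xs ≠ [] := List.ne_nil_of_mem hx
  rw [nearestDist_eq]
  cases h : ominFold (xs.map fun x => |w - x|) with
  | none => simp [ominFold_eq_none_iff] at h; simp [h] at hx
  | some m =>
    have := ominFold_isMin h |w - x| (List.mem_map.mpr ⟨x, hx, rfl⟩)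
    simpa using this

lemma nearest_attained {xs : List Int} (w : Int) (hne : xs ≠ []) :
    ∃ x ∈ xs, (nearestDist w xs).getD 0 = |w - x| := by
  rw [nearestDist_eq]
  cases h : ominFold (xs.map fun x => |w - x|) with
  | none => rw [ominFold_eq_none_iff] at h; simp [hne] at h
  | some m =>
    have := ominFold_mem h
    rcases List.mem_map.mp this with ⟨x, hx, hmx⟩
    exact ⟨x, hx, by simp [← hmx]⟩

-- the two ways both programs fold the per-split minimum into the running max agree
lemma match_max_eq (E : Option Int) (acc : Int) :
    (match E with | some v => max acc v | none => acc)
    = (match E with | some mv => if mv > acc then mv else acc | none => acc) := by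
  cases E with
  | none => rfl
  | some v => simp only; omega

-- the core separation: min over triples = min over w2 of (nearest left + nearest right)
lemma split_min (A B C : List Int) (hA : A ≠ []) (hC : C ≠ []) :
    ominFold (A.flatMap fun w1 => B.flatMap fun w2 => C.map fun w3 => |w1 - w2| + |w2 - w3|)
    = ominFold (B.map fun w2 => (nearestDist w2 A).getD 0 + (nearestDist w2 C).getD 0) := by
  cases B with
  | nil => simp [ominFold, List.flatMap]
  | cons b Bt =>
    rcases List.exists_mem_of_ne_nil A hA with ⟨a0, ha0⟩
    rcases List.exists_mem_of_ne_nil C hC with ⟨c0, hc0⟩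
    -- both lists are nonempty, so both folds are some
    have hLne : (A.flatMap fun w1 => (b :: Bt).flatMap fun w2 => C.map fun w3 => |w1 - w2| + |w2 - w3|) ≠ [] := by
      apply List.ne_nil_of_mem (a := |a0 - b| + |b - c0|)
      exact List.mem_flatMap.mpr ⟨a0, ha0, List.mem_flatMap.mpr ⟨b, by simp,
        List.mem_map.mpr ⟨c0, hc0, rfl⟩⟩⟩
    cases hL : ominFold (A.flatMap fun w1 => (b :: Bt).flatMap fun w2 => C.map fun w3 => |w1 - w2| + |w2 - w3|) with
    | none => exact absurd ((ominFold_eq_none_iff _).mp hL) hLne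
    | some m1 =>
      cases hR : ominFold ((b :: Bt).map fun w2 => (nearestDist w2 A).getD 0 + (nearestDist w2 C).getD 0) with
      | none => rw [ominFold_eq_none_iff] at hR; simp at hR
      | some m2 =>
        congr 1
        have h12 : m2 ≤ m1 := by
          rcases List.mem_flatMap.mp (ominFold_mem hL) with ⟨w1, hw1, hrest⟩
          rcases List.mem_flatMap.mp hrest with ⟨w2, hw2, hrest2⟩
          rcases List.mem_map.mp hrest2 with ⟨w3, hw3, hval⟩
          have hs : m2 ≤ (nearestDist w2 A).getD 0 + (nearestDist w2 C).getD 0 :=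
            ominFold_isMin hR _ (List.mem_map.mpr ⟨w2, hw2, rfl⟩)
          have h1 : (nearestDist w2 A).getD 0 ≤ |w2 - w1| := nearest_le w2 hw1
          have h2 : (nearestDist w2 C).getD 0 ≤ |w2 - w3| := nearest_le w2 hw3
          rw [← hval, abs_sub_comm w1 w2]
          omega
        have h21 : m1 ≤ m2 := by
          rcases List.mem_map.mp (ominFold_mem hR) with ⟨w2, hw2, hval⟩
          rcases nearest_attained w2 hA with ⟨w1, hw1, e1⟩
          rcases nearest_attained w2 hC with ⟨w3, hw3, e3⟩
          have hmem : |w1 - w2| + |w2 - w3| ∈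
              (A.flatMap fun w1 => (b :: Bt).flatMap fun w2 => C.map fun w3 => |w1 - w2| + |w2 - w3|) :=
            List.mem_flatMap.mpr ⟨w1, hw1, List.mem_flatMap.mpr ⟨w2, hw2,
              List.mem_map.mpr ⟨w3, hw3, rfl⟩⟩⟩
          have := ominFold_isMin hL _ hmem
          rw [← hval, e1, e3, abs_sub_comm w2 w1] at *
          omega
        omega

-- ===== VERDICT (by name: the statement is the Claim_ definition above) =====
theorem solution_spec : Claim_equal_solution := by
  intro Arr n _ hpre
  unfold Spec_solution solution solution_alt
  by_cases h2 : n ≤ 2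
  · rw [PySem.List.pyRange_one_eq_nil (show n - 1 ≤ 1 by omega)]; rfl
  · have hlen : n ≤ (Arr.length : Int) := hpre.resolve_left h2
    apply PySem.List.foldl_congr_mem
    intro acc i hi
    rw [PySem.List.mem_pyRange_one] at hi
    apply PySem.List.foldl_congr_mem
    intro acc' j hj
    rw [PySem.List.mem_pyRange_one] at hj
    have hAne : PySem.List.slice Arr none (some i) ≠ [] := by
      rw [PySem.List.slice_to Arr (by omega)]
      exact List.ne_nil_of_length_pos (by rw [List.length_take]; omega)
    have hCne : PySem.List.slice Arr (some j) none ≠ [] := by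
      rw [PySem.List.slice_from Arr (by omega)]
      exact List.ne_nil_of_length_pos (by rw [List.length_drop]; omega)
    simp only
    rw [triple_flatten, midFold_eq]
    have hsp := split_min (PySem.List.slice Arr none (some i))
      (PySem.List.slice Arr (some i) (some j)) (PySem.List.slice Arr (some j) none) hAne hCne
    simp only [ominFold] at hsp
    rw [hsp]
    exact match_max_eq _ _
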